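-- pv_equiv track=rewrite | github.com/smartyal/21datalab | bokeh_web/widgets.py | get_min_max_times
-- ===== SOURCE A (Python) =====
-- def get_min_max_times(newData):
--     mini = 1000*1000*1000*1000*1000
--     maxi = 0
--     for k,v in newData.items():
--         if k.endswith("__time"):
--             check=[mini]
--             check.extend(v[1:-1])
--             mini =  min(check)
--             check=[maxi]
--             check.extend(v[1:-1])
--             maxi=max(check)
--     return mini,maxi
-- ===== SOURCE B (Python) =====
-- def get_min_max_times(newData):
--     times = sorted(t for k, v in newData.items()
--                    if k.endswith("__time") for t in v[1:-1])
--     if not times: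
--         return 1000*1000*1000*1000*1000, 0
--     return min(1000*1000*1000*1000*1000, times[0]), max(0, times[-1])
-- ===== Notes on version B (the rewrite author's own statement) =====
-- stated objective: alternative
-- what changed: B flattens all trimmed '__time' series into one list, sorts it once, and reads the global minimum and maximum off the sorted endpoints (folding the sentinels in at the end), instead of A's per-key rebuild of a [running-extremum]+slice list reduced twice inside the loop.
import Mathlib
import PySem

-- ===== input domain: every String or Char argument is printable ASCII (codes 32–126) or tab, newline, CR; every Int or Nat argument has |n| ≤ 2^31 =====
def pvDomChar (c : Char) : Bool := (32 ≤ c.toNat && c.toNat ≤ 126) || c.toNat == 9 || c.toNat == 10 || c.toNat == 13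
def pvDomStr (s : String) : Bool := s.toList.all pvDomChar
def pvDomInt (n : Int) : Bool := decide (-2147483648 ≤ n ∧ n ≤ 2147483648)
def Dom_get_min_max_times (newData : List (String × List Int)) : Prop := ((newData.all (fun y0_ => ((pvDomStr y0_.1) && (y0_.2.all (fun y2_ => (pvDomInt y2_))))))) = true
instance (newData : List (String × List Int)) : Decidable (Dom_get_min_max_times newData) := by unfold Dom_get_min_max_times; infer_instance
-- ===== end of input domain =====

-- B flattens all trimmed '__time' slices into one list, sorts it once, and reads the extremes
-- off the sorted endpoints (folding sentinels in at the end), instead of A's interleaved per-key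
-- running-min/max reductions (objective: alternative — different algorithm, similar size).


-- ===== PORT A =====
def get_min_max_times (newData : List (String × List Int)) : Int × Int :=
  newData.foldl (fun (st : Int × Int) kv =>
    if PySem.Str.endswith kv.1 "__time" then
      let check1 := st.1 :: PySem.List.slice kv.2 (some 1) (some (-1))
      let mini := (PySem.List.min? check1 (fun y => y)).getD 0   -- check1 is nonempty, so min? is some; getD 0 never fires
      let check2 := st.2 :: PySem.List.slice kv.2 (some 1) (some (-1))
      let maxi := (PySem.List.max? check2 (fun y => y)).getD 0   -- likewise
      (mini, maxi)
    else st)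
    (1000*1000*1000*1000*1000, 0)

-- ===== PORT B =====
def get_min_max_times_alt (newData : List (String × List Int)) : Int × Int :=
  let times := PySem.List.sorted
    (newData.flatMap (fun kv =>
      if PySem.Str.endswith kv.1 "__time" then PySem.List.slice kv.2 (some 1) (some (-1)) else []))
    (fun y => y) false
  match times with
  | [] => (1000*1000*1000*1000*1000, 0)
  | h :: t => (min (1000*1000*1000*1000*1000) h, max 0 ((h :: t).getLast (List.cons_ne_nil h t)))

-- ===== PRECONDITION & SPEC =====
def Spec_get_min_max_times (newData : List (String × List Int)) (out : Int × Int) : Prop := out = get_min_max_times_alt newData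
instance (newData : List (String × List Int)) (out : Int × Int) : Decidable (Spec_get_min_max_times newData out) := by unfold Spec_get_min_max_times; infer_instance

-- ===== CLAIM (what is proved, stated in full; the proofs are below) =====
def Claim_equal_get_min_max_times : Prop := ∀ (newData : List (String × List Int)), Dom_get_min_max_times newData → Spec_get_min_max_times newData (get_min_max_times newData)

-- ===== LEMMAS AND PROOFS =====

-- the values both programs range over: all trimmed '__time' slices, concatenated
def pvVals (newData : List (String × List Int)) : List Int :=
  newData.flatMap (fun kv =>
    if PySem.Str.endswith kv.1 "__time" then PySem.List.slice kv.2 (some 1) (some (-1)) else [])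

-- A's loop is the pair of running folds over pvVals
theorem pvA_fold_eq (newData : List (String × List Int)) (m M : Int) :
    newData.foldl (fun (st : Int × Int) kv =>
      if PySem.Str.endswith kv.1 "__time" then
        let check1 := st.1 :: PySem.List.slice kv.2 (some 1) (some (-1))
        let mini := (PySem.List.min? check1 (fun y => y)).getD 0
        let check2 := st.2 :: PySem.List.slice kv.2 (some 1) (some (-1))
        let maxi := (PySem.List.max? check2 (fun y => y)).getD 0
        (mini, maxi)
      else st) (m, M)
    = ((pvVals newData).foldl min m, (pvVals newData).foldl max M) := by
  induction newData generalizing m M with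
  | nil => simp [pvVals]
  | cons kv t ih =>
    have hv : pvVals (kv :: t)
        = (if PySem.Str.endswith kv.1 "__time" = true then PySem.List.slice kv.2 (some 1) (some (-1)) else []) ++ pvVals t := by
      simp only [pvVals, List.flatMap_cons]
    rw [List.foldl_cons]
    by_cases h : PySem.Str.endswith kv.1 "__time" = true
    · rw [if_pos h, hv, if_pos h]
      show (t.foldl _ ((PySem.List.min? (m :: _) (fun y => y)).getD 0,
        (PySem.List.max? (M :: _) (fun y => y)).getD 0)) = _
      rw [PySem.List.min?_id_cons, PySem.List.max?_id_cons, Option.getD_some, Option.getD_some,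
        ih, List.foldl_append, List.foldl_append]
    · rw [if_neg h, hv, if_neg h, ih, List.nil_append]

theorem pv_foldl_min_of_le (a : Int) (xs : List Int) (h : ∀ y ∈ xs, a ≤ y) :
    xs.foldl min a = a := by
  induction xs with
  | nil => rfl
  | cons x t ih =>
    rw [List.foldl_cons, min_eq_left (h x (List.mem_cons_self))]
    exact ih (fun y hy => h y (List.mem_cons_of_mem _ hy))

-- fold of min over an ascending list starting from m is min m head
theorem pv_foldl_min_sorted (m h : Int) (t : List Int)
    (hp : (h :: t).Pairwise (fun a b => a ≤ b)) :
    (h :: t).foldl min m = min m h := by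
  rw [List.foldl_cons]
  exact pv_foldl_min_of_le _ _ (fun y hy =>
    le_trans (min_le_right m h) ((List.pairwise_cons.mp hp).1 y hy))

-- fold of max over an ascending list starting from M is max M (last)
theorem pv_foldl_max_sorted (M : Int) (s : List Int)
    (hp : s.Pairwise (fun a b => a ≤ b)) (hne : s ≠ []) :
    s.foldl max M = max M (s.getLast hne) := by
  induction s generalizing M with
  | nil => exact absurd rfl hne
  | cons a t ih =>
    rcases List.pairwise_cons.mp hp with ⟨ha, hpt⟩
    cases t with
    | nil => simp
    | cons b u =>
      rw [List.foldl_cons, ih (max M a) hpt (List.cons_ne_nil b u),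
        List.getLast_cons (List.cons_ne_nil b u)]
      have hle : a ≤ (b :: u).getLast (List.cons_ne_nil b u) :=
        ha _ (List.getLast_mem _)
      rw [max_assoc, max_eq_right hle]

-- ===== VERDICT (by name: the statement is the Claim_ definition above) =====
theorem get_min_max_times_spec : Claim_equal_get_min_max_times := by
  intro newData _
  unfold Spec_get_min_max_times get_min_max_times get_min_max_times_alt
  rw [pvA_fold_eq]
  show _ = (match PySem.List.sorted (pvVals newData) (fun y => y) false with
    | [] => ((1000*1000*1000*1000*1000 : Int), (0 : Int))
    | h :: t => (min (1000*1000*1000*1000*1000) h, max 0 ((h :: t).getLast (List.cons_ne_nil h t))))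
  have hperm : (PySem.List.sorted (pvVals newData) (fun y => y) false).Perm (pvVals newData) :=
    PySem.List.sorted_perm _ _ _
  have hpw : (PySem.List.sorted (pvVals newData) (fun y => y) false).Pairwise (fun a b => a ≤ b) :=
    PySem.List.sorted_pairwise _ _
  cases hs : PySem.List.sorted (pvVals newData) (fun y => y) false with
  | nil =>
    have : pvVals newData = [] := (PySem.List.sorted_eq_nil_iff _ _ _).mp hs
    simp [this]
  | cons h t =>
    rw [hs] at hperm hpw
    have hmin : (pvVals newData).foldl min (1000*1000*1000*1000*1000) = min (1000*1000*1000*1000*1000) h := by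
      have rc : RightCommutative (min : Int → Int → Int) :=
        ⟨fun b a1 a2 => by rw [min_assoc, min_comm a1 a2, min_assoc]⟩
      rw [← @List.Perm.foldl_eq _ _ min _ _ rc hperm (1000*1000*1000*1000*1000 : Int)]
      exact pv_foldl_min_sorted _ _ _ hpw
    have hmax : (pvVals newData).foldl max 0 = max 0 ((h :: t).getLast (List.cons_ne_nil h t)) := by
      have rc : RightCommutative (max : Int → Int → Int) :=
        ⟨fun b a1 a2 => by rw [max_assoc, max_comm a1 a2, max_assoc]⟩
      rw [← @List.Perm.foldl_eq _ _ max _ _ rc hperm (0 : Int)]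
      exact pv_foldl_max_sorted _ _ hpw (List.cons_ne_nil h t)
    rw [hmin, hmax]
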